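-- pv_equiv track=rewrite | github.com/eirik-evjenth/Python_Collection | Visual Studio IT 2/Advent of Code/Dec2_part1.py | check_sequences
-- ===== SOURCE A (Python) =====
-- def is_safe(sequence):
--     increasing = all(x < y for x, y in zip(sequence, sequence[1:]))
--     decreasing = all(x > y for x, y in zip(sequence, sequence[1:]))
--     valid_difference = all(1 <= abs(x - y) <= 3 for x, y in zip(sequence, sequence[1:]))
--
--     return (increasing or decreasing) and valid_difference
--
-- def check_sequences(sequences):
--     results = []
--     for seq in sequences:
--         if is_safe(seq):
--             results.append("safe")
--         else:
--             results.append("unsafe")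
--     return results
-- ===== SOURCE B (Python) =====
-- def check_sequences(sequences):
--     return ["safe" if _safe(seq) else "unsafe" for seq in sequences]
--
-- def _safe(seq):
--     # single early-exit pass: fix the expected direction from the first step,
--     # then require every signed step to be in 1..3
--     if len(seq) < 2:
--         return True
--     sign = 1 if seq[1] > seq[0] else -1
--     prev = seq[0]
--     for x in seq[1:]:
--         d = (x - prev) * sign
--         if not (1 <= d <= 3):
--             return False
--         prev = x
--     return True
-- ===== Notes on version B (the rewrite author's own statement) =====
-- stated objective: alternative
-- what changed: B replaces A's three full pairwise passes and (inc or dec) and valid flag logic with a single early-exit state-machine pass: the direction sign is fixed by the first step and every signed step must lie in 1..3, so monotonicity and the gap bound collapse into one test and no pass runs past the first violation.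
import Mathlib
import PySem

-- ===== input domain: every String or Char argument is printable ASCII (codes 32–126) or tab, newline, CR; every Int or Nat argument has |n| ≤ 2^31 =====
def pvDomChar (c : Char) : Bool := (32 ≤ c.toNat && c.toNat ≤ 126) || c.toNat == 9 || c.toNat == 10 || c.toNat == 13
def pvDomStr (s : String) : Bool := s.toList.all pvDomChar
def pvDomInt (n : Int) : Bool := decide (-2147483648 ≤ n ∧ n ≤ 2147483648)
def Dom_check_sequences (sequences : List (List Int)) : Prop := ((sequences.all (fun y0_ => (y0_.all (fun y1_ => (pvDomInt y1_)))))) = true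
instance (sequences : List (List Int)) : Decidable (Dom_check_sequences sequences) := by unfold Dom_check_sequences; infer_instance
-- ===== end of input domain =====

-- B replaces A's three full pairwise passes with one early-exit pass whose direction sign is
-- fixed by the first step (alternative decomposition; same exact behaviour).

-- ===== PORT A =====
-- A's is_safe: three `all` passes over zip(seq, seq[1:]), then (inc or dec) and valid.
def is_safe (sequence : List Int) : Bool :=
  let pairs := sequence.zip (PySem.List.slice sequence (some 1) none)
  let increasing := pairs.all (fun p => decide (p.1 < p.2))
  let decreasing := pairs.all (fun p => decide (p.1 > p.2))
  let valid_difference := pairs.all (fun p => decide (1 ≤ (p.1 - p.2).natAbs ∧ (p.1 - p.2).natAbs ≤ 3))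
  (increasing || decreasing) && valid_difference

def check_sequences (sequences : List (List Int)) : List String :=
  sequences.foldl (fun results seq =>
    if is_safe seq then results ++ ["safe"] else results ++ ["unsafe"]) []

-- ===== PORT B =====
-- B's `for x in seq[1:]` loop with early return, threading prev:
def safeFrom (sign : Int) (prev : Int) (rest : List Int) : Bool :=
  match rest with
  | [] => true
  | x :: t => if 1 ≤ (x - prev) * sign ∧ (x - prev) * sign ≤ 3 then safeFrom sign x t else false

-- B's _safe
def pySafe (seq : List Int) : Bool :=
  if seq.length < 2 then true
  else
    match seq with
    | a :: b :: t =>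
        let sign : Int := if b > a then 1 else -1
        safeFrom sign a (b :: t)
    | _ => true   -- unreachable: length ≥ 2

def check_sequences_alt (sequences : List (List Int)) : List String :=
  sequences.map (fun seq => if pySafe seq then "safe" else "unsafe")

-- ===== PRECONDITION & SPEC =====
def Spec_check_sequences (sequences : List (List Int)) (out : List String) : Prop := out = check_sequences_alt sequences
instance (sequences : List (List Int)) (out : List String) : Decidable (Spec_check_sequences sequences out) := by unfold Spec_check_sequences; infer_instance

-- ===== CLAIM =====
def Claim_equal_check_sequences : Prop := ∀ (sequences : List (List Int)), Dom_check_sequences sequences → Spec_check_sequences sequences (check_sequences sequences)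

-- ===== LEMMAS AND PROOFS =====

-- B's loop characterised as one `all` over the adjacent pairs
theorem safeFrom_eq (sign : Int) (prev : Int) (l : List Int) :
    safeFrom sign prev l
      = ((prev :: l).zip l).all (fun p => decide (1 ≤ (p.2 - p.1) * sign ∧ (p.2 - p.1) * sign ≤ 3)) := by
  induction l generalizing prev with
  | nil => rfl
  | cons x t ih =>
    simp only [safeFrom, List.zip_cons_cons, List.all_cons]
    rw [ih x]
    split
    · simp_all
    · simp_all

-- the per-sequence core
theorem pv_key (seq : List Int) : is_safe seq = pySafe seq := by
  match seq with
  | [] => rfl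
  | [a] => rfl
  | a :: b :: t =>
    unfold is_safe pySafe
    rw [PySem.List.slice_from_one]
    simp only [List.tail_cons, List.length_cons]
    rw [if_neg (by omega)]
    rw [safeFrom_eq]
    by_cases hab : b > a
    · rw [if_pos hab]
      rw [Bool.eq_iff_iff]
      simp only [Bool.and_eq_true, Bool.or_eq_true, List.all_eq_true, decide_eq_true_eq]
      constructor
      · rintro ⟨hinc | hdec, hv⟩
        · intro p hp; have := hinc p hp; have := hv p hp; omega
        · have := hdec (a, b) (by simp); omega
      · intro h
        exact ⟨Or.inl (fun p hp => by have := h p hp; omega),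
               fun p hp => by have := h p hp; omega⟩
    · rw [if_neg hab]
      rw [Bool.eq_iff_iff]
      simp only [Bool.and_eq_true, Bool.or_eq_true, List.all_eq_true, decide_eq_true_eq]
      constructor
      · rintro ⟨hinc | hdec, hv⟩
        · have := hinc (a, b) (by simp); omega
        · intro p hp; have := hdec p hp; have := hv p hp; omega
      · intro h
        exact ⟨Or.inr (fun p hp => by have := h p hp; omega),
               fun p hp => by have := h p hp; omega⟩

-- A's foldl-with-append equals append of B's map
theorem pv_foldl (sequences : List (List Int)) (acc : List String) :
    sequences.foldl (fun results seq =>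
      if is_safe seq then results ++ ["safe"] else results ++ ["unsafe"]) acc
    = acc ++ sequences.map (fun seq => if pySafe seq then "safe" else "unsafe") := by
  induction sequences generalizing acc with
  | nil => simp
  | cons s t ih =>
    simp only [List.foldl_cons, List.map_cons]
    rw [show (if is_safe s then acc ++ ["safe"] else acc ++ ["unsafe"])
          = acc ++ [if pySafe s then "safe" else "unsafe"] from by rw [← pv_key]; split <;> rfl,
        ih]
    simp

-- ===== VERDICT =====
theorem check_sequences_spec : Claim_equal_check_sequences := by
  intro sequences _
  unfold Spec_check_sequences check_sequences check_sequences_alt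
  simpa using pv_foldl sequences []
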